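-- pv_equiv track=rewrite | github.com/mitchellnel/technical-interview-prep | .archive/gtci/11-subsets/stringPermutationsByChangingCase.py | find_string_permutations_by_changing_case
-- ===== SOURCE A (Python) =====
-- def find_string_permutations_by_changing_case(string):
--     permutations = [string]
--
--     # process every character of the string one-by-one
--     for idx, char in enumerate(string):
--         if char.isalpha():  # only process chars, skip digits
--             # we will take all existing permutations and change the letter
--             #   case appropriately
--             n = len(permutations)
--             for j in range(n):
--                 old_permutation = permutations[j]
--
--                 new_permutation = list(old_permutation)
--                 new_permutation[idx] = new_permutation[idx].swapcase()
--
--                 permutations.append("".join(new_permutation))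
--
--     return permutations
-- ===== SOURCE B (Python) =====
-- def find_string_permutations_by_changing_case(string):
--     # Enumerate all 2**k case masks directly (k = number of alphabetic chars),
--     # instead of repeatedly doubling a permutation list.
--     alpha_idxs = [i for i, ch in enumerate(string) if ch.isalpha()]
--     k = len(alpha_idxs)
--     result = []
--     for count in range(2 ** k):
--         chars = list(string)
--         for bit, i in enumerate(alpha_idxs):
--             if (count >> bit) & 1:
--                 chars[i] = chars[i].swapcase()
--         result.append("".join(chars))
--     return result
-- ===== Notes on version B (the rewrite author's own statement) =====
-- stated objective: alternative
-- what changed: Replaces the in-place doubling of a growing permutation list with direct enumeration of all 2^k case masks (k = number of alphabetic characters), rebuilding each variant from the original string by reading the bits of the mask.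
import Mathlib
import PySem

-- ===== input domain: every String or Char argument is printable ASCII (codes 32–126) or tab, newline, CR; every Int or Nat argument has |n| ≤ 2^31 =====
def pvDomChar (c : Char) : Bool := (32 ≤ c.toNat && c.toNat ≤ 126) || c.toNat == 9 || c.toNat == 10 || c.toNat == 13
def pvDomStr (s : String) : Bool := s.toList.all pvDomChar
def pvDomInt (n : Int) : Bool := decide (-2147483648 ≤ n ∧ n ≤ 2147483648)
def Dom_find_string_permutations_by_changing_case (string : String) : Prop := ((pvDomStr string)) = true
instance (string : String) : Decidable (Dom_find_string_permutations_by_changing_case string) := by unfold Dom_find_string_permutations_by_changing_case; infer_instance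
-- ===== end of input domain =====

-- B enumerates all 2^k case masks directly instead of A's repeated doubling of a
-- permutation list; same output, alternative decomposition (no speed claim).

-- ===== PORT A =====
-- Python's str.swapcase on one char, exact on the ASCII domain.
def swapcaseChar (c : Char) : Char :=
  if PySem.Chars.isupper c then PySem.Chars.lowerChar c
  else if PySem.Chars.islower c then PySem.Chars.upperChar c
  else c

-- chars[i] = chars[i].swapcase(); exact here since i is always a valid
-- nonnegative index (it comes from enumerate over a string of the same length).
def setSwap (cs : List Char) (i : Int) : List Char :=
  cs.set i.toNat (swapcaseChar (cs.getD i.toNat ' '))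

def find_string_permutations_by_changing_case (string : String) : List String :=
  (PySem.List.enumerate string.toList 0).foldl
    (fun permutations p =>
      if PySem.Chars.isalpha p.2 then
        -- inner for-j loop over the snapshot of length n appends the flipped copies
        permutations ++ permutations.map (fun old => String.ofList (setSwap old.toList p.1))
      else permutations)
    [string]

-- ===== PORT B =====
def find_string_permutations_by_changing_case_alt (string : String) : List String :=
  let alpha_idxs := ((PySem.List.enumerate string.toList 0).filter (fun p => PySem.Chars.isalpha p.2)).map (·.1)
  let k := alpha_idxs.length
  (List.range (2 ^ k)).map (fun count =>
    String.ofList ((PySem.List.enumerate alpha_idxs 0).foldl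
      (fun chars q =>
        -- (count >> bit) & 1  ==  Nat.testBit count bit
        if count.testBit q.1.toNat then setSwap chars q.2 else chars)
      string.toList))

-- ===== PRECONDITION & SPEC =====
def Spec_find_string_permutations_by_changing_case (string : String) (out : List String) : Prop := out = find_string_permutations_by_changing_case_alt string
instance (string : String) (out : List String) : Decidable (Spec_find_string_permutations_by_changing_case string out) := by unfold Spec_find_string_permutations_by_changing_case; infer_instance

-- ===== CLAIM (what is proved, stated in full; the proofs are below) =====
def Claim_equal_find_string_permutations_by_changing_case : Prop := ∀ (string : String), Dom_find_string_permutations_by_changing_case string → Spec_find_string_permutations_by_changing_case string (find_string_permutations_by_changing_case string)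

-- ===== LEMMAS AND PROOFS =====

-- flipping bits of `count` listed in `al` starting at bit position `b`
def applyAux (count : Nat) : List Char → Nat → List Int → List Char
  | cs, _, [] => cs
  | cs, b, i :: rest => applyAux count (if count.testBit b then setSwap cs i else cs) (b + 1) rest

theorem foldl_enum_apply (count : Nat) (al : List Int) : ∀ (cs : List Char) (b : Int), 0 ≤ b →
    (PySem.List.enumerate al b).foldl
      (fun chars q => if count.testBit q.1.toNat then setSwap chars q.2 else chars) cs
    = applyAux count cs b.toNat al := by
  induction al with
  | nil => intro cs b hb; simp [PySem.List.enumerate, applyAux]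
  | cons i rest ih =>
    intro cs b hb
    rw [PySem.List.enumerate_cons]
    simp only [List.foldl_cons, applyAux]
    rw [ih _ (b + 1) (by omega)]
    congr 1
    omega

theorem applyAux_append (count : Nat) (al : List Int) : ∀ (cs : List Char) (b : Nat) (i : Int),
    applyAux count cs b (al ++ [i])
      = (if count.testBit (b + al.length) then setSwap (applyAux count cs b al) i
         else applyAux count cs b al) := by
  induction al with
  | nil => intro cs b i; simp [applyAux]
  | cons j rest ih =>
    intro cs b i
    simp only [List.cons_append, applyAux, ih, List.length_cons]
    rw [show b + 1 + rest.length = b + (rest.length + 1) from by omega]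

theorem applyAux_congr (c₁ c₂ : Nat) (al : List Int) :
    ∀ (cs : List Char) (b : Nat), (∀ t, b ≤ t → t < b + al.length → c₁.testBit t = c₂.testBit t) →
    applyAux c₁ cs b al = applyAux c₂ cs b al := by
  induction al with
  | nil => intro cs b _; simp [applyAux]
  | cons j rest ih =>
    intro cs b h
    simp only [applyAux]
    rw [h b (le_refl b) (by simp)]
    exact ih _ (b + 1) (fun t ht1 ht2 => h t (by omega) (by simp at ht2 ⊢; omega))

theorem main_lemma (al : List Int) (cs : List Char) :
    al.foldl (fun perms i => perms ++ perms.map (fun old => String.ofList (setSwap old.toList i)))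
      [String.ofList cs]
    = (List.range (2 ^ al.length)).map (fun count => String.ofList (applyAux count cs 0 al)) := by
  induction al using List.reverseRecOn with
  | nil => simp [applyAux]
  | append_singleton al i ih =>
    rw [List.foldl_append]
    simp only [List.foldl_cons, List.foldl_nil, ih]
    have hlen : (al ++ [i]).length = al.length + 1 := by simp
    rw [hlen, pow_succ, Nat.mul_two, List.range_add, List.map_append, List.map_map]
    congr 1
    · apply List.map_congr_left
      intro count hmem
      rw [List.mem_range] at hmem
      rw [applyAux_append]
      rw [Nat.zero_add, Nat.testBit_lt_two_pow hmem]
      simp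
    · rw [List.map_map]
      apply List.map_congr_left
      intro count hmem
      rw [List.mem_range] at hmem
      simp only [Function.comp_apply]
      rw [applyAux_append, Nat.zero_add]
      have h1 : (2 ^ al.length + count).testBit al.length = true := by
        rw [Nat.testBit_two_pow_add_eq, Nat.testBit_lt_two_pow hmem]; rfl
      rw [h1]
      simp only [if_true]
      have h2 : applyAux (2 ^ al.length + count) cs 0 al = applyAux count cs 0 al := by
        apply applyAux_congr
        intro t _ ht
        exact Nat.testBit_two_pow_add_gt (by omega) count
      rw [h2, String.toList_ofList]

-- ===== VERDICT (by name: the statement is the Claim_ definition above) =====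
theorem A_filter (l : List (Int × Char)) : ∀ (init : List String),
    l.foldl (fun permutations p =>
        if PySem.Chars.isalpha p.2 then
          permutations ++ permutations.map (fun old => String.ofList (setSwap old.toList p.1))
        else permutations) init
    = ((l.filter (fun p => PySem.Chars.isalpha p.2)).map (·.1)).foldl
        (fun perms i => perms ++ perms.map (fun old => String.ofList (setSwap old.toList i))) init := by
  induction l with
  | nil => intro init; rfl
  | cons x xs ih =>
    intro init
    by_cases h : PySem.Chars.isalpha x.2 <;> simp [h, ih]

theorem find_string_permutations_by_changing_case_spec : Claim_equal_find_string_permutations_by_changing_case := by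
  intro string _
  unfold Spec_find_string_permutations_by_changing_case
  unfold find_string_permutations_by_changing_case find_string_permutations_by_changing_case_alt
  rw [A_filter]
  conv_lhs => rw [show [string] = [String.ofList string.toList] from by rw [String.ofList_toList]]
  rw [main_lemma]
  dsimp only
  apply List.map_congr_left
  intro count _
  rw [foldl_enum_apply count _ string.toList 0 (le_refl 0)]
  rfl
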